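-- pv_equiv track=rewrite | github.com/Ajay-Ram-Rana/DSA | Module-3/Q2.7.py | count_increasing_triplet
-- ===== SOURCE A (Python) =====
-- def count_increasing_triplet(A):
--   n = len(A)
--   if n<3:
--     return 0
--
--   count = 0
--   for i in range(n-2):
--     if A[i]<A[i+1]<A[i+2]:
--       count = count+1
--   return count
-- ===== SOURCE B (Python) =====
-- def count_increasing_triplet(A):
--     count = 0
--     up = 0
--     prev = None
--     for x in A:
--         if prev is not None and prev < x:
--             up += 1
--         else:
--             up = 0
--         if up >= 2:
--             count += 1
--         prev = x
--     return count
-- ===== Notes on version B (the rewrite author's own statement) =====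
-- stated objective: alternative
-- what changed: B replaces A's index-based scan over triplet windows A[i]<A[i+1]<A[i+2] by a single value-based pass that maintains the length of the current strictly-increasing run and counts every step at which the run length reaches 2.
import Mathlib
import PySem

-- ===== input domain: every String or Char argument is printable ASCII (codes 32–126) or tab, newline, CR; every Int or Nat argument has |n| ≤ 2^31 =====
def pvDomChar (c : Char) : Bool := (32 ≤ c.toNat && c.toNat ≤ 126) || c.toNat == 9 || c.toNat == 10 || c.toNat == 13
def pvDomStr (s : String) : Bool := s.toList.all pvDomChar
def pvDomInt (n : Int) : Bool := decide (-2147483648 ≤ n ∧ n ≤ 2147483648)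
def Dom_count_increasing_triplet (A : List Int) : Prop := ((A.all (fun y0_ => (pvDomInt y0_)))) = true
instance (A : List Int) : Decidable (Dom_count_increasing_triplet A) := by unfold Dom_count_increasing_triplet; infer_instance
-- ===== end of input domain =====

-- B replaces A's index-based triplet-window scan by a single value-based pass
-- maintaining the current strictly-increasing run length (objective: alternative decomposition).

-- ===== PORT A =====
-- every index read by the loop is in range (0 ≤ i, i+2 ≤ n-1), so pyGetD with default 0 is exact
def count_increasing_triplet (A : List Int) : Int :=
  let n : Int := A.length
  if n < 3 then 0
  else
    (PySem.List.pyRange 0 (n - 2) 1).foldl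
      (fun count i =>
        if PySem.List.pyGetD A i 0 < PySem.List.pyGetD A (i + 1) 0 ∧
           PySem.List.pyGetD A (i + 1) 0 < PySem.List.pyGetD A (i + 2) 0
        then count + 1 else count) 0

-- ===== PORT B =====
-- loop state (count, up, prev): prev is None before the first element
def pvAltStep (s : Int × Int × Option Int) (x : Int) : Int × Int × Option Int :=
  let up' : Int := match s.2.2 with
    | some p => if p < x then s.2.1 + 1 else 0
    | none => 0
  ((if 2 ≤ up' then s.1 + 1 else s.1), up', some x)

def count_increasing_triplet_alt (A : List Int) : Int :=
  (A.foldl pvAltStep (0, 0, none)).1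

-- ===== PRECONDITION & SPEC =====
def Spec_count_increasing_triplet (A : List Int) (out : Int) : Prop := out = count_increasing_triplet_alt A
instance (A : List Int) (out : Int) : Decidable (Spec_count_increasing_triplet A out) := by unfold Spec_count_increasing_triplet; infer_instance

-- ===== CLAIM (what is proved, stated in full; the proofs are below) =====
def Claim_equal_count_increasing_triplet : Prop := ∀ (A : List Int), Dom_count_increasing_triplet A → Spec_count_increasing_triplet A (count_increasing_triplet A)

-- ===== LEMMAS AND PROOFS =====

-- reference count of strictly increasing adjacent triples
def pvTrips : List Int → Int
  | a :: b :: c :: t => (if a < b ∧ b < c then 1 else 0) + pvTrips (b :: c :: t)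
  | _ => 0

lemma pvAlt_go (l : List Int) : ∀ (a b u cnt : Int), 0 ≤ u → (1 ≤ u ↔ a < b) →
    (l.foldl pvAltStep (cnt, u, some b)).1 = cnt + pvTrips (a :: b :: l) := by
  induction l with
  | nil => intro a b u cnt _ _; simp [pvTrips]
  | cons x l ih =>
    intro a b u cnt hu h
    simp only [List.foldl_cons, pvAltStep]
    rw [ih b x (if b < x then u + 1 else 0) _ (by split_ifs <;> omega)
          (by split_ifs with hb <;> simp [hb] <;> omega)]
    simp only [pvTrips]
    split_ifs <;> simp_all <;> omega

lemma pvAlt_eq_trips (l : List Int) : count_increasing_triplet_alt l = pvTrips l := by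
  cases l with
  | nil => simp [count_increasing_triplet_alt, pvTrips]
  | cons x l =>
    have h0 : pvAltStep (0, 0, none) x = (0, 0, some x) := by simp [pvAltStep]
    have := pvAlt_go l x x 0 0 (by omega) (by omega)
    simp only [count_increasing_triplet_alt, List.foldl_cons, h0, this]
    cases l <;> simp [pvTrips]

lemma pvA_go (l : List Int) : ∀ (c : Int),
    (List.range (l.length - 2)).foldl
      (fun c k => if l.getD k 0 < l.getD (k + 1) 0 ∧ l.getD (k + 1) 0 < l.getD (k + 2) 0
                  then c + 1 else c) c = c + pvTrips l := by
  induction l with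
  | nil => intro c; simp [pvTrips]
  | cons a l ih =>
    intro c
    match l with
    | [] => simp [pvTrips]
    | [b] => simp [pvTrips]
    | b :: cc :: t =>
      have hlen : (a :: b :: cc :: t).length - 2 = t.length + 1 := by simp
      rw [hlen, List.range_succ_eq_map, List.foldl_cons, List.foldl_map]
      have hl2 : (b :: cc :: t).length - 2 = t.length := by simp
      have hih := ih (if (a :: b :: cc :: t).getD 0 0 < (a :: b :: cc :: t).getD 1 0 ∧
          (a :: b :: cc :: t).getD 1 0 < (a :: b :: cc :: t).getD 2 0 then c + 1 else c)
      rw [hl2] at hih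
      simp only [List.getD_cons_succ, List.getD_cons_zero] at hih ⊢
      rw [hih]
      simp only [pvTrips]
      split_ifs <;> omega

lemma pvA_eq_trips (l : List Int) : count_increasing_triplet l = pvTrips l := by
  unfold count_increasing_triplet
  by_cases h : (l.length : Int) < 3
  · simp only [h, if_true]
    match l, h with
    | [], _ => simp [pvTrips]
    | [_], _ => simp [pvTrips]
    | [_, _], _ => simp [pvTrips]
    | _ :: _ :: _ :: _, h => simp at h; omega
  · simp only [h, if_false]
    rw [PySem.List.pyRange_one]
    have ht : ((l.length : Int) - 2 - 0).toNat = l.length - 2 := by omega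
    rw [ht, List.foldl_map]
    have hfun : (fun (x : Int) (y : Nat) =>
        if PySem.List.pyGetD l (0 + ↑y) 0 < PySem.List.pyGetD l (0 + ↑y + 1) 0 ∧
           PySem.List.pyGetD l (0 + ↑y + 1) 0 < PySem.List.pyGetD l (0 + ↑y + 2) 0
        then x + 1 else x) =
        (fun (c : Int) (k : Nat) =>
        if l.getD k 0 < l.getD (k + 1) 0 ∧ l.getD (k + 1) 0 < l.getD (k + 2) 0
        then c + 1 else c) := by
      funext x y
      have e1 : (0 + (y : Int)) = ((y : Nat) : Int) := by omega
      have e2 : ((y : Int) + 1) = (((y + 1 : Nat)) : Int) := by push_cast; ring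
      have e3 : ((y : Int) + 2) = (((y + 2 : Nat)) : Int) := by push_cast; ring
      rw [e1, e2, e3, PySem.List.pyGetD_natCast, PySem.List.pyGetD_natCast,
          PySem.List.pyGetD_natCast]
    rw [hfun, pvA_go l 0]
    omega

-- ===== VERDICT (by name: the statement is the Claim_ definition above) =====
theorem count_increasing_triplet_spec : Claim_equal_count_increasing_triplet := by
  intro A _
  unfold Spec_count_increasing_triplet
  rw [pvA_eq_trips, pvAlt_eq_trips]
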